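-- pv_equiv track=rewrite | github.com/z727354123/goTest | 02_pyBase/leetcode/2022_08/001_情景触发_02_ans.py | getTriggerTime
-- ===== SOURCE A (Python) =====
-- def getTriggerTime(day_increase, story_requires):
-- 	"""
-- 	:type day_increase: List[List[int]]
-- 	:type story_requires: List[List[int]]
-- 	:rtype: List[int]
-- 	"""
-- 	tmp = [0 for i in range(3)]
-- 	# 将剧情的下标记录在story中，方便映射结果
-- 	story_requires = [x + [i] for i, x in enumerate(story_requires)]
-- 	# 将requirements按三种维度分别排序，得到 s
-- 	newS = [sorted(story_requires, key=lambda x: x[i]) for i in range(3)]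
-- 	index = [0 for i in range(3)]
--
-- 	reqLen = len(story_requires)
-- 	trigger = [0 for i in range(reqLen)]
-- 	ans = [-1 for i in range(reqLen)]
-- 	# 枚举每一天
-- 	for d, (na, nb, nc) in enumerate(day_increase):
-- 		# 计算当天的属性
-- 		tmp[0] += na;
-- 		tmp[1] += nb;
-- 		tmp[2] += nc
-- 		# 遍历三种属性的排序序列，计算当前可以被触发的剧情
-- 		for i in range(3):
-- 			while index[i] < reqLen and tmp[i] >= newS[i][index[i]][i]:
-- 				trigger[newS[i][index[i]][-1]] += 1
-- 				# 如果某个剧情触发次数等于3次(三种属性均触发，剧情被实际触发)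
-- 				if trigger[newS[i][index[i]][-1]] == 3:
-- 					ans[newS[i][index[i]][-1]] = d + 1
-- 				index[i] += 1
-- 	# 第0天单独考虑
-- 	for i, (na, nb, nc, _) in enumerate(story_requires):
-- 		if na == 0 and nb == 0 and nc == 0:
-- 			ans[_] = 0
-- 	return ans
-- ===== SOURCE B (Python) =====
-- def getTriggerTime(day_increase, story_requires):
--     # prefix sums per attribute
--     pa, pb, pc = [], [], []
--     ta = tb = tc = 0
--     for na, nb, nc in day_increase:
--         ta += na; tb += nb; tc += nc
--         pa.append(ta); pb.append(tb); pc.append(tc)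
--     res = []
--     for a, b, c in story_requires:
--         if a == 0 and b == 0 and c == 0:
--             res.append(0)
--             continue
--         best = -1
--         for p, r in ((pa, a), (pb, b), (pc, c)):
--             d = next((i for i, v in enumerate(p) if v >= r), None)
--             if d is None:
--                 best = None
--                 break
--             if d > best:
--                 best = d
--         res.append(-1 if best is None else best + 1)
--     return res
-- ===== Notes on version B (the rewrite author's own statement) =====
-- stated objective: simpler
-- what changed: A sorts the requirements three times and sweeps days with three pointers and a shared trigger counter; B builds the three prefix-sum arrays once and answers each story independently by scanning each prefix array for the first day meeting that threshold, taking the max (prefix sums may decrease, so a linear first-hit scan, not bisect, is the exact equivalent).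
import Mathlib
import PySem

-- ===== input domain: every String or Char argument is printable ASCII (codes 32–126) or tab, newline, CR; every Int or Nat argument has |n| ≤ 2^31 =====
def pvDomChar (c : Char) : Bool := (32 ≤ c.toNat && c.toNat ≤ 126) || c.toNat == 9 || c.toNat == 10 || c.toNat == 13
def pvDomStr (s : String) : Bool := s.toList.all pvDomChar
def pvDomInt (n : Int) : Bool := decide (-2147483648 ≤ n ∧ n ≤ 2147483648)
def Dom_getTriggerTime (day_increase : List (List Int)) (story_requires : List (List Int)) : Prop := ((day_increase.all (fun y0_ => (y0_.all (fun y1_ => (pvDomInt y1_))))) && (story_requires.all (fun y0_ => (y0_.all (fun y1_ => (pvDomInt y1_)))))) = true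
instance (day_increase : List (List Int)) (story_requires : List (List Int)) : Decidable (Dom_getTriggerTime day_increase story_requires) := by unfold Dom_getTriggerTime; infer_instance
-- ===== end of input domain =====

-- ===== PORT A =====
-- B re-implements A with per-story scans over prefix-sum arrays instead of A's three sorted
-- pointer sweeps; equivalence is about the return value (neither Python mutates its arguments).

-- x[i]: Python indexing with a default; exact on every index actually used under Pre_ (all rows
-- of both inputs have length 3, so the augmented story rows have length 4 and every index 0..3 and -1 is in range)
def pvGet (x : List Int) (i : Int) : Int := PySem.List.pyGetD x i 0

-- body of A's inner while loop: trigger[j] += 1; if trigger[j] == 3: ans[j] = d + 1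
def pvEvent (d : Int) (trigAns : List Int × List Int) (x : List Int) : List Int × List Int :=
  let j := pvGet x (-1)
  let trig := PySem.List.pySetD trigAns.1 j (pvGet trigAns.1 j + 1)
  let ans := if pvGet trig j == 3 then PySem.List.pySetD trigAns.2 j (d + 1) else trigAns.2
  (trig, ans)

-- A's inner while loop (fuel = reqLen+1 dominates the number of iterations: idx increases, bounded by reqLen)
def pvWhile (s : List (List Int)) (i reqLen d t : Int) :
    Nat → Int → List Int → List Int → Int × List Int × List Int
  | 0, idx, trig, ans => (idx, trig, ans)
  | fuel+1, idx, trig, ans =>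
    if idx < reqLen ∧ pvGet (PySem.List.pyGetD s idx []) i ≤ t then
      let ta := pvEvent d (trig, ans) (PySem.List.pyGetD s idx [])
      pvWhile s i reqLen d t fuel (idx + 1) ta.1 ta.2
    else (idx, trig, ans)

-- A's body of 'for d, (na, nb, nc) in enumerate(day_increase)'
def pvDayStep (newS : List (List (List Int))) (reqLen : Int)
    (st : List Int × List Int × List Int × List Int) (p : Int × List Int) :
    List Int × List Int × List Int × List Int :=
  let tmp := st.1
  let d := p.1
  let tmp := PySem.List.pySetD tmp 0 (pvGet tmp 0 + pvGet p.2 0)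
  let tmp := PySem.List.pySetD tmp 1 (pvGet tmp 1 + pvGet p.2 1)
  let tmp := PySem.List.pySetD tmp 2 (pvGet tmp 2 + pvGet p.2 2)
  (PySem.List.pyRange 0 3 1).foldl
    (fun st i =>
      let r := pvWhile (PySem.List.pyGetD newS i []) i reqLen d (pvGet st.1 i)
        (reqLen.toNat + 1) (pvGet st.2.1 i) st.2.2.1 st.2.2.2
      (st.1, PySem.List.pySetD st.2.1 i r.1, r.2.1, r.2.2))
    (tmp, st.2.1, st.2.2.1, st.2.2.2)

def getTriggerTime (day_increase : List (List Int)) (story_requires : List (List Int)) : List Int :=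
  let tmp := (PySem.List.pyRange 0 3 1).map (fun _ => (0 : Int))
  let story := (PySem.List.enumerate story_requires 0).map (fun p => p.2 ++ [p.1])
  let newS := (PySem.List.pyRange 0 3 1).map (fun i => PySem.List.sorted story (fun x => pvGet x i) false)
  let index := (PySem.List.pyRange 0 3 1).map (fun _ => (0 : Int))
  let reqLen : Int := story.length
  let trigger := (PySem.List.pyRange 0 reqLen 1).map (fun _ => (0 : Int))
  let ans := (PySem.List.pyRange 0 reqLen 1).map (fun _ => (-1 : Int))
  let st := (PySem.List.enumerate day_increase 0).foldl (pvDayStep newS reqLen)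
    (tmp, index, trigger, ans)
  (PySem.List.enumerate story 0).foldl
    (fun ans p =>
      if pvGet p.2 0 = 0 ∧ pvGet p.2 1 = 0 ∧ pvGet p.2 2 = 0 then
        PySem.List.pySetD ans (pvGet p.2 3) 0
      else ans)
    st.2.2.2

-- ===== PORT B =====
-- next((i for i, v in enumerate(p) if v >= r), None): index of the first prefix sum meeting r
def pvFirst (p : List Int) (r : Int) : Option Nat := p.findIdx? (fun v => r ≤ v)

-- B's inner loop over the three (prefix array, requirement) pairs, with its early break on None
def pvBest : List (List Int × Int) → Int → Option Int
  | [], best => some best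
  | (p, r) :: rest, best =>
    match pvFirst p r with
    | none => none
    | some d => pvBest rest (if best < (d : Int) then (d : Int) else best)

def getTriggerTime_alt (day_increase : List (List Int)) (story_requires : List (List Int)) : List Int :=
  let pref := day_increase.foldl
    (fun (st : List Int × List Int × List Int × Int × Int × Int) row =>
      let ta := st.2.2.2.1 + pvGet row 0
      let tb := st.2.2.2.2.1 + pvGet row 1
      let tc := st.2.2.2.2.2 + pvGet row 2
      (st.1 ++ [ta], st.2.1 ++ [tb], st.2.2.1 ++ [tc], ta, tb, tc))
    ([], [], [], 0, 0, 0)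
  story_requires.foldl
    (fun res row =>
      if pvGet row 0 = 0 ∧ pvGet row 1 = 0 ∧ pvGet row 2 = 0 then res ++ [(0 : Int)]
      else
        match pvBest [(pref.1, pvGet row 0), (pref.2.1, pvGet row 1), (pref.2.2.1, pvGet row 2)] (-1) with
        | none => res ++ [(-1 : Int)]
        | some best => res ++ [best + 1])
    []

-- ===== PRECONDITION & SPEC =====
-- Pre_: every row of both arguments has length exactly 3; on any other input Python A raises
-- (ValueError on tuple unpacking or IndexError in the sort key), so nothing A returns on is excluded.
def Pre_getTriggerTime (day_increase : List (List Int)) (story_requires : List (List Int)) : Prop :=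
  (∀ r ∈ day_increase, r.length = 3) ∧ (∀ r ∈ story_requires, r.length = 3)
instance (day_increase : List (List Int)) (story_requires : List (List Int)) : Decidable (Pre_getTriggerTime day_increase story_requires) := by unfold Pre_getTriggerTime; infer_instance

def pvWitness_getTriggerTime : List (List Int) × List (List Int) :=
  ([[1, 2, 3], [0, -1, 2]], [[1, 1, 1], [0, 0, 0], [5, 0, 0]])

def Spec_getTriggerTime (day_increase : List (List Int)) (story_requires : List (List Int)) (out : List Int) : Prop := out = getTriggerTime_alt day_increase story_requires
instance (day_increase : List (List Int)) (story_requires : List (List Int)) (out : List Int) : Decidable (Spec_getTriggerTime day_increase story_requires out) := by unfold Spec_getTriggerTime; infer_instance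

-- ===== CLAIM (what is proved, stated in full; the proofs are below) =====
def Claim_equal_getTriggerTime : Prop := ∀ (day_increase : List (List Int)) (story_requires : List (List Int)), Dom_getTriggerTime day_increase story_requires → Pre_getTriggerTime day_increase story_requires → Spec_getTriggerTime day_increase story_requires (getTriggerTime day_increase story_requires)

-- ===== LEMMAS AND PROOFS =====

-- ---- proof-side descriptions of the data both programs compute ----

-- the column of attribute i
def pvCol (di : List (List Int)) (i : Int) : List Int := di.map (fun r => pvGet r i)

-- prefix sums starting from accumulator t (the list B builds; A's tmp is its running value)
def pvPrefl : List Int → Int → List Int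
  | [], _ => []
  | x :: xs, t => (t + x) :: pvPrefl xs (t + x)

def pvP (di : List (List Int)) (i : Int) : List Int := pvPrefl (pvCol di i) 0

-- "story x has its dimension-i requirement met within the first d days of prefix list P"
def pvQual (P : List Int) (d : Nat) (i : Int) (x : List Int) : Bool :=
  (P.take d).any (fun v => decide (pvGet x i ≤ v))

-- A's augmented story list
def pvStor (sr : List (List Int)) : List (List Int) :=
  (PySem.List.enumerate sr 0).map (fun p => p.2 ++ [p.1])

def pvEnt (sr : List (List Int)) (j : Nat) : List Int := (pvStor sr).getD j []

-- first day (0-based) dimension i is met, as an Int (meaningful when some day meets it)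
def pvFdI (P : List Int) (i : Int) (x : List Int) : Int :=
  (((P.findIdx? (fun v => decide (pvGet x i ≤ v))).getD 0 : Nat) : Int)

-- the day the story triggers: latest of the three first days
def pvMfd (di : List (List Int)) (x : List Int) : Int :=
  (pvFdI (pvP di 0) 0 x ⊔ pvFdI (pvP di 1) 1 x) ⊔ pvFdI (pvP di 2) 2 x

lemma pvPrefl_length (xs : List Int) (t : Int) : (pvPrefl xs t).length = xs.length := by
  induction xs generalizing t with
  | nil => simp [pvPrefl]
  | cons x xs ih => simp [pvPrefl, ih]

lemma pvPrefl_getD (xs : List Int) (t : Int) (k : Nat) (hk : k < xs.length) :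
    (pvPrefl xs t).getD k 0 = t + (xs.take (k + 1)).sum := by
  induction xs generalizing t k with
  | nil => simp at hk
  | cons x xs ih =>
    cases k with
    | zero => simp [pvPrefl]
    | succ k =>
      simp only [pvPrefl, List.getD_cons_succ, List.take_succ_cons, List.sum_cons]
      rw [ih _ k (by simpa using hk)]
      ring

lemma pvQual_le (P : List Int) (d e : Nat) (i : Int) (x : List Int) (hde : d ≤ e)
    (h : pvQual P d i x = true) : pvQual P e i x = true := by
  simp only [pvQual, List.any_eq_true] at h ⊢
  obtain ⟨v, hv, hc⟩ := h
  refine ⟨v, ?_, hc⟩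
  have : P.take d = (P.take e).take d := by rw [List.take_take, min_eq_left hde]
  rw [this] at hv
  exact List.mem_of_mem_take hv

lemma pvQual_succ (P : List Int) (d : Nat) (i : Int) (x : List Int) (hd : d < P.length) :
    pvQual P (d + 1) i x = (pvQual P d i x || decide (pvGet x i ≤ P.getD d 0)) := by
  simp only [pvQual, List.take_add_one, List.any_append, List.getElem?_eq_getElem hd,
    List.getD_eq_getElem _ _ hd]
  simp

lemma pvQual_zero (P : List Int) (i : Int) (x : List Int) : pvQual P 0 i x = false := by
  simp [pvQual]

lemma pvQual_full (P : List Int) (i : Int) (x : List Int) :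
    pvQual P P.length i x = (P.findIdx? (fun v => decide (pvGet x i ≤ v))).isSome := by
  simp [pvQual, List.findIdx?_isSome]

lemma pvQual_fd_lt (P : List Int) (d : Nat) (i : Int) (x : List Int)
    (h : pvQual P d i x = true) :
    ∃ k, P.findIdx? (fun v => decide (pvGet x i ≤ v)) = some k ∧ k < d := by
  simp only [pvQual, List.any_eq_true] at h
  obtain ⟨v, hv, hc⟩ := h
  obtain ⟨m, hm, hvm⟩ := List.mem_take_iff_getElem.1 hv
  have hsome : (P.findIdx? (fun v => decide (pvGet x i ≤ v))).isSome := by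
    rw [List.findIdx?_isSome, List.any_eq_true]
    exact ⟨v, List.mem_of_mem_take hv, hc⟩
  obtain ⟨k, hk⟩ := Option.isSome_iff_exists.1 hsome
  refine ⟨k, hk, ?_⟩
  obtain ⟨hklen, hpk, hmin⟩ := List.findIdx?_eq_some_iff_getElem.1 hk
  by_contra hkd
  have hmk : m < k := by omega
  have := hmin m hmk
  rw [hvm] at this
  simp [hc] at this

lemma pvQual_first_hit (P : List Int) (d : Nat) (i : Int) (x : List Int) (hd : d < P.length)
    (h1 : pvQual P d i x = false) (h2 : pvGet x i ≤ P.getD d 0) :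
    P.findIdx? (fun v => decide (pvGet x i ≤ v)) = some d := by
  rw [List.findIdx?_eq_some_iff_getElem]
  refine ⟨hd, by rw [List.getD_eq_getElem _ _ hd] at h2; simpa using h2, ?_⟩
  intro m hm
  simp only [pvQual, List.any_eq_false] at h1
  have : P[m] ∈ P.take d := by
    rw [List.mem_take_iff_getElem]
    exact ⟨m, by omega, rfl⟩
  simpa using h1 _ this

-- getD/set arithmetic
lemma pvGetD_set_self (l : List Int) (j : Nat) (v : Int) (hj : j < l.length) :
    (l.set j v).getD j 0 = v := by
  rw [List.getD_eq_getElem?_getD, List.getElem?_set_self hj]; rfl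

lemma pvGetD_set_ne (l : List Int) (j k : Nat) (v : Int) (h : j ≠ k) :
    (l.set j v).getD k 0 = l.getD k 0 := by
  rw [List.getD_eq_getElem?_getD, List.getElem?_set_ne h, ← List.getD_eq_getElem?_getD]


-- effect of A's inner-loop body folded over a block of consumed entries (distinct story ids)
lemma pvEvent_foldl (d : Int) (seg : List (List Int)) (trig ans : List Int)
    (hal : ans.length = trig.length)
    (hj : ∀ x ∈ seg, ∃ jn : Nat, pvGet x (-1) = (jn : Int) ∧ jn < trig.length)
    (hnd : (seg.map (fun x => pvGet x (-1))).Nodup) :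
    (seg.foldl (pvEvent d) (trig, ans)).1.length = trig.length ∧
    (seg.foldl (pvEvent d) (trig, ans)).2.length = ans.length ∧
    ∀ jn : Nat, jn < trig.length →
      (if ∃ x ∈ seg, pvGet x (-1) = (jn : Int)
       then (seg.foldl (pvEvent d) (trig, ans)).1.getD jn 0 = trig.getD jn 0 + 1 ∧
            (seg.foldl (pvEvent d) (trig, ans)).2.getD jn 0 =
              (if trig.getD jn 0 + 1 = 3 then d + 1 else ans.getD jn 0)
       else (seg.foldl (pvEvent d) (trig, ans)).1.getD jn 0 = trig.getD jn 0 ∧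
            (seg.foldl (pvEvent d) (trig, ans)).2.getD jn 0 = ans.getD jn 0) := by
  induction seg generalizing trig ans with
  | nil => simp
  | cons x seg ih =>
    obtain ⟨j0, hx0, hx0len⟩ := hj x (List.mem_cons_self ..)
    have hx0' : PySem.List.pyGetD x (-1) 0 = ((j0 : Nat) : Int) := hx0
    have hc : (trig.set j0 (trig.getD j0 0 + 1)).getD j0 0 = trig.getD j0 0 + 1 :=
      pvGetD_set_self _ _ _ hx0len
    have hstep : pvEvent d (trig, ans) x =
        (trig.set j0 (trig.getD j0 0 + 1),
         if trig.getD j0 0 + 1 = 3 then ans.set j0 (d + 1) else ans) := by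
      simp only [pvEvent, pvGet, hx0', PySem.List.pySetD_natCast, PySem.List.pyGetD_natCast, hc]
      simp [beq_iff_eq]
    have hlen1 : (trig.set j0 (trig.getD j0 0 + 1)).length = trig.length := by simp
    have hnd' : (seg.map (fun x => pvGet x (-1))).Nodup := (List.nodup_cons.1 hnd).2
    have hx0nt : pvGet x (-1) ∉ seg.map (fun x => pvGet x (-1)) := (List.nodup_cons.1 hnd).1
    have ihr := ih (trig.set j0 (trig.getD j0 0 + 1))
      (if trig.getD j0 0 + 1 = 3 then ans.set j0 (d + 1) else ans)
      (by split <;> simp [hal])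
      (by intro y hy; obtain ⟨jn, h1, h2⟩ := hj y (List.mem_cons_of_mem _ hy);
          exact ⟨jn, h1, by simpa using h2⟩) hnd'
    obtain ⟨ihl1, ihl2, ihv⟩ := ihr
    simp only [List.foldl_cons, hstep]
    refine ⟨by rw [ihl1]; simp, by rw [ihl2]; split <;> simp, ?_⟩
    intro jn hjn
    by_cases hje : jn = j0
    · subst hje
      have hnot : ¬ ∃ y ∈ seg, pvGet y (-1) = (jn : Int) := by
        rintro ⟨y, hy, hyv⟩
        exact hx0nt (by rw [hx0, ← hyv]; exact List.mem_map_of_mem hy)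
      have := ihv jn (by simpa using hjn)
      rw [if_neg hnot] at this
      rw [if_pos ⟨x, List.mem_cons_self .., hx0⟩]
      obtain ⟨e1, e2⟩ := this
      refine ⟨by rw [e1, pvGetD_set_self _ _ _ hjn], ?_⟩
      rw [e2]
      split <;> rename_i h3
      · rw [pvGetD_set_self _ _ _ (by omega : jn < ans.length)]
      · rfl
    · have hset : (trig.set j0 (trig.getD j0 0 + 1)).getD jn 0 = trig.getD jn 0 :=
        pvGetD_set_ne _ _ _ _ (fun h => hje h.symm)
      have hans : (if trig.getD j0 0 + 1 = 3 then ans.set j0 (d + 1) else ans).getD jn 0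
          = ans.getD jn 0 := by
        split
        · exact pvGetD_set_ne _ _ _ _ (fun h => hje h.symm)
        · rfl
      have := ihv jn (by simpa using hjn)
      by_cases hex : ∃ y ∈ seg, pvGet y (-1) = (jn : Int)
      · rw [if_pos hex] at this
        rw [if_pos (by obtain ⟨y, hy, hyv⟩ := hex; exact ⟨y, List.mem_cons_of_mem _ hy, hyv⟩)]
        obtain ⟨e1, e2⟩ := this
        refine ⟨by rw [e1, hset], by rw [e2, hset, hans]⟩
      · rw [if_neg hex] at this
        have hnotc : ¬ ∃ y ∈ x :: seg, pvGet y (-1) = (jn : Int) := by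
          rintro ⟨y, hy, hyv⟩
          rcases List.mem_cons.1 hy with rfl | hy'
          · exact hje (by rw [hx0] at hyv; exact_mod_cast hyv.symm)
          · exact hex ⟨y, hy', hyv⟩
        rw [if_neg hnotc]
        obtain ⟨e1, e2⟩ := this
        exact ⟨by rw [e1, hset], by rw [e2, hans]⟩


-- A's while loop consumes exactly the leading block of still-affordable entries
lemma pvWhile_spec (s : List (List Int)) (i d t : Int) :
    ∀ (v u : List (List Int)) (trig ans : List Int) (fuel : Nat),
      s = u ++ v → v.length + 1 ≤ fuel →
      pvWhile s i (s.length : Int) d t fuel (u.length : Int) trig ans =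
        (((u.length + (v.takeWhile (fun x => decide (pvGet x i ≤ t))).length : Nat) : Int),
         (v.takeWhile (fun x => decide (pvGet x i ≤ t))).foldl (pvEvent d) (trig, ans)) := by
  intro v
  induction v with
  | nil =>
    intro u trig ans fuel hs hf
    match fuel, hf with
    | fuel + 1, _ =>
      simp only [pvWhile]
      rw [if_neg]
      · simp
      · rintro ⟨hlt, -⟩
        rw [hs] at hlt
        simp at hlt
  | cons x v ihv =>
    intro u trig ans fuel hs hf
    match fuel, hf with
    | fuel + 1, hf =>
      have hget : PySem.List.pyGetD s ((u.length : Nat) : Int) [] = x := by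
        rw [PySem.List.pyGetD_natCast, hs, List.getD_eq_getElem?_getD,
          List.getElem?_append_right (le_refl _)]
        simp
      simp only [pvWhile, hget]
      by_cases hc : pvGet x i ≤ t
      · rw [if_pos ⟨by rw [hs]; simp only [List.length_append, List.length_cons]; push_cast; omega, hc⟩]
        have := ihv (u ++ [x]) (pvEvent d (trig, ans) x).1 (pvEvent d (trig, ans) x).2 fuel
          (by rw [hs]; simp) (by simpa using hf)
        simp only [List.length_append, List.length_cons, List.length_nil] at this
        have hcast : ((u.length : Int) + 1) = (((u.length + 1 : Nat)) : Int) := by push_cast; ring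
        rw [hcast, this]
        rw [List.takeWhile_cons, if_pos (by simpa using hc)]
        simp only [List.length_cons, List.foldl_cons]
        refine congrArg₂ Prod.mk ?_ rfl
        congr 1
        omega
      · rw [if_neg (by rintro ⟨-, h⟩; exact hc h)]
        rw [List.takeWhile_cons, if_neg (by simpa using hc)]
        simp

-- effect of A's final zero-requirement override loop
lemma pvZero_foldl (es : List (Int × List Int)) (ans : List Int)
    (hj : ∀ e ∈ es, ∃ jn : Nat, pvGet e.2 3 = (jn : Int) ∧ jn < ans.length) :
    (es.foldl (fun ans p =>
        if pvGet p.2 0 = 0 ∧ pvGet p.2 1 = 0 ∧ pvGet p.2 2 = 0 then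
          PySem.List.pySetD ans (pvGet p.2 3) 0
        else ans) ans).length = ans.length ∧
    ∀ jn : Nat, jn < ans.length →
      (if ∃ e ∈ es, pvGet e.2 3 = (jn : Int) ∧ pvGet e.2 0 = 0 ∧ pvGet e.2 1 = 0 ∧ pvGet e.2 2 = 0
       then (es.foldl (fun ans p =>
          if pvGet p.2 0 = 0 ∧ pvGet p.2 1 = 0 ∧ pvGet p.2 2 = 0 then
            PySem.List.pySetD ans (pvGet p.2 3) 0
          else ans) ans).getD jn 0 = 0
       else (es.foldl (fun ans p =>
          if pvGet p.2 0 = 0 ∧ pvGet p.2 1 = 0 ∧ pvGet p.2 2 = 0 then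
            PySem.List.pySetD ans (pvGet p.2 3) 0
          else ans) ans).getD jn 0 = ans.getD jn 0) := by
  induction es generalizing ans with
  | nil => simp
  | cons e es ih =>
    obtain ⟨j0, hj0, hj0len⟩ := hj e (List.mem_cons_self ..)
    by_cases hz : pvGet e.2 0 = 0 ∧ pvGet e.2 1 = 0 ∧ pvGet e.2 2 = 0
    · have hstep : (fun ans (p : Int × List Int) =>
          if pvGet p.2 0 = 0 ∧ pvGet p.2 1 = 0 ∧ pvGet p.2 2 = 0 then
            PySem.List.pySetD ans (pvGet p.2 3) 0
          else ans) ans e = ans.set j0 0 := by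
        dsimp only
        rw [if_pos hz, hj0, PySem.List.pySetD_natCast]
      have ihr := ih (ans.set j0 0)
        (by intro y hy; obtain ⟨jn, h1, h2⟩ := hj y (List.mem_cons_of_mem _ hy)
            exact ⟨jn, h1, by simpa using h2⟩)
      obtain ⟨ihl, ihv⟩ := ihr
      simp only [List.foldl_cons, hstep]
      refine ⟨by rw [ihl]; simp, ?_⟩
      intro jn hjn
      have hv := ihv jn (by simpa using hjn)
      by_cases hex : ∃ y ∈ es, pvGet y.2 3 = (jn : Int) ∧ pvGet y.2 0 = 0 ∧ pvGet y.2 1 = 0 ∧ pvGet y.2 2 = 0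
      · rw [if_pos hex] at hv
        rw [if_pos (by obtain ⟨y, hy, hv2⟩ := hex; exact ⟨y, List.mem_cons_of_mem _ hy, hv2⟩)]
        exact hv
      · rw [if_neg hex] at hv
        by_cases hje : jn = j0
        · subst hje
          rw [if_pos ⟨e, List.mem_cons_self .., hj0, hz⟩]
          rw [hv, pvGetD_set_self _ _ _ hjn]
        · have hnotc : ¬ ∃ y ∈ e :: es, pvGet y.2 3 = (jn : Int) ∧ pvGet y.2 0 = 0 ∧ pvGet y.2 1 = 0 ∧ pvGet y.2 2 = 0 := by
            rintro ⟨y, hy, hyv, hyz⟩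
            rcases List.mem_cons.1 hy with rfl | hy'
            · exact hje (by rw [hj0] at hyv; exact_mod_cast hyv.symm)
            · exact hex ⟨y, hy', hyv, hyz⟩
          rw [if_neg hnotc, hv, pvGetD_set_ne _ _ _ _ (fun h => hje h.symm)]
    · have hstep : (fun ans (p : Int × List Int) =>
          if pvGet p.2 0 = 0 ∧ pvGet p.2 1 = 0 ∧ pvGet p.2 2 = 0 then
            PySem.List.pySetD ans (pvGet p.2 3) 0
          else ans) ans e = ans := by dsimp only; rw [if_neg hz]
      have ihr := ih ans
        (by intro y hy; exact hj y (List.mem_cons_of_mem _ hy))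
      obtain ⟨ihl, ihv⟩ := ihr
      simp only [List.foldl_cons, hstep]
      refine ⟨ihl, ?_⟩
      intro jn hjn
      have hv := ihv jn hjn
      have hiff : (∃ y ∈ e :: es, pvGet y.2 3 = (jn : Int) ∧ pvGet y.2 0 = 0 ∧ pvGet y.2 1 = 0 ∧ pvGet y.2 2 = 0)
          ↔ (∃ y ∈ es, pvGet y.2 3 = (jn : Int) ∧ pvGet y.2 0 = 0 ∧ pvGet y.2 1 = 0 ∧ pvGet y.2 2 = 0) := by
        constructor
        · rintro ⟨y, hy, hyv, hyz⟩
          rcases List.mem_cons.1 hy with rfl | hy'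
          · exact absurd hyz hz
          · exact ⟨y, hy', hyv, hyz⟩
        · rintro ⟨y, hy, hyv, hyz⟩
          exact ⟨y, List.mem_cons_of_mem _ hy, hyv, hyz⟩
      by_cases hex : ∃ y ∈ es, pvGet y.2 3 = (jn : Int) ∧ pvGet y.2 0 = 0 ∧ pvGet y.2 1 = 0 ∧ pvGet y.2 2 = 0
      · rw [if_pos hex] at hv; rw [if_pos (hiff.2 hex)]; exact hv
      · rw [if_neg hex] at hv; rw [if_neg (fun h => hex (hiff.1 h))]; exact hv


-- ---- facts about the augmented story list ----

lemma pvStor_length (sr : List (List Int)) : (pvStor sr).length = sr.length := by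
  simp [pvStor, PySem.List.length_enumerate]

lemma pvStor_getElem (sr : List (List Int)) (j : Nat) (hj : j < sr.length) :
    (pvStor sr)[j]'(by rw [pvStor_length]; exact hj) = sr[j] ++ [(j : Int)] := by
  simp [pvStor, PySem.List.getElem_enumerate]

lemma pvEnt_eq (sr : List (List Int)) (j : Nat) (hj : j < sr.length) :
    pvEnt sr j = sr[j] ++ [(j : Int)] := by
  rw [pvEnt, List.getD_eq_getElem _ _ (by rw [pvStor_length]; exact hj), pvStor_getElem _ _ hj]

lemma pvEnt_last (sr : List (List Int)) (j : Nat) (hj : j < sr.length) :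
    pvGet (pvEnt sr j) (-1) = (j : Int) := by
  rw [pvEnt_eq _ _ hj, pvGet, PySem.List.pyGetD_neg_one_append_singleton]

lemma pvStor_mem_iff (sr : List (List Int)) (x : List Int) :
    x ∈ pvStor sr ↔ ∃ (j : Nat) (hj : j < sr.length), x = sr[j] ++ [(j : Int)] := by
  constructor
  · intro hx
    obtain ⟨j, hjl, hje⟩ := List.mem_iff_getElem.1 hx
    have hj : j < sr.length := by simpa [pvStor_length] using hjl
    exact ⟨j, hj, by rw [← hje, pvStor_getElem _ _ hj]⟩
  · rintro ⟨j, hj, rfl⟩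
    rw [← pvStor_getElem _ _ hj]
    exact List.getElem_mem _

lemma pvStor_map_last (sr : List (List Int)) :
    (pvStor sr).map (fun x => pvGet x (-1)) = (List.range sr.length).map Int.ofNat := by
  apply List.ext_getElem
  · simp [pvStor_length]
  · intro j h1 h2
    have hj : j < sr.length := by simpa [pvStor_length] using h1
    rw [List.getElem_map, List.getElem_map, List.getElem_range, pvStor_getElem _ _ hj, pvGet,
      PySem.List.pyGetD_neg_one_append_singleton]
    rfl

lemma pvStor_last_nodup (sr : List (List Int)) :
    ((pvStor sr).map (fun x => pvGet x (-1))).Nodup := by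
  rw [pvStor_map_last]
  exact (List.nodup_range).map (fun a b h => Int.ofNat.inj h)

-- reading the first three attributes of an augmented row
lemma pvGet_row3 (r : List Int) (hr : r.length = 3) (e : Int) :
    pvGet (r ++ [e]) 0 = pvGet r 0 ∧ pvGet (r ++ [e]) 1 = pvGet r 1 ∧
    pvGet (r ++ [e]) 2 = pvGet r 2 ∧ pvGet (r ++ [e]) 3 = e := by
  match r, hr with
  | [a, b, c], _ => refine ⟨rfl, rfl, rfl, rfl⟩

-- after dropWhile on a key-sorted list, no element is still affordable
lemma pvDropWhile_all_not (v : List (List Int)) (i t : Int)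
    (hp : v.Pairwise (fun a b => pvGet a i ≤ pvGet b i)) :
    ∀ x ∈ v.dropWhile (fun x => decide (pvGet x i ≤ t)),
      (decide (pvGet x i ≤ t) : Bool) = false := by
  induction v with
  | nil => simp
  | cons y v ih =>
    rw [List.dropWhile_cons]
    split
    · exact ih (List.pairwise_cons.1 hp).2
    · rename_i hy
      intro x hx
      rcases List.mem_cons.1 hx with rfl | hx'
      · simpa using hy
      · have h1 : pvGet y i ≤ pvGet x i := (List.pairwise_cons.1 hp).1 x hx'
        have h2 : ¬ pvGet y i ≤ t := by simpa using hy
        simp only [decide_eq_false_iff_not]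
        omega

-- one inner-loop pass (one dimension, one day) tracked against the qualification predicates
lemma pvDim_step (sr : List (List Int))
    (P : List Int) (i : Int) (d : Nat) (hd : d < P.length)
    (s u v : List (List Int)) (trig ans : List Int)
    (hperm : s.Perm (pvStor sr)) (hpair : s.Pairwise (fun a b => pvGet a i ≤ pvGet b i))
    (hsplit : s = u ++ v)
    (hu : ∀ x ∈ u, pvQual P d i x = true) (hv : ∀ x ∈ v, pvQual P d i x = false)
    (htl : trig.length = sr.length) (hal : ans.length = sr.length)
    (oth : Nat → Int) (othAll : Nat → Bool) (mfd : Nat → Int)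
    (hoth : ∀ j, j < sr.length → (0 ≤ oth j ∧ oth j ≤ 2) ∧ (oth j = 2 ↔ othAll j = true))
    (hmfd : ∀ j, j < sr.length → pvQual P (d + 1) i (pvEnt sr j) = true →
      pvQual P d i (pvEnt sr j) = false → othAll j = true → mfd j = (d : Int))
    (htrig : ∀ j, j < sr.length →
      trig.getD j 0 = oth j + (if pvQual P d i (pvEnt sr j) = true then 1 else 0))
    (hans : ∀ j, j < sr.length →
      ans.getD j 0 = if othAll j = true ∧ pvQual P d i (pvEnt sr j) = true then mfd j + 1 else -1) :
    ∃ u' v' trig' ans',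
      pvWhile s i (sr.length : Int) (d : Int) (P.getD d 0) (sr.length + 1) ((u.length : Nat) : Int) trig ans
        = (((u'.length : Nat) : Int), trig', ans') ∧
      s = u' ++ v' ∧
      (∀ x ∈ u', pvQual P (d + 1) i x = true) ∧ (∀ x ∈ v', pvQual P (d + 1) i x = false) ∧
      trig'.length = sr.length ∧ ans'.length = sr.length ∧
      (∀ j, j < sr.length →
        trig'.getD j 0 = oth j + (if pvQual P (d + 1) i (pvEnt sr j) = true then 1 else 0)) ∧
      (∀ j, j < sr.length →
        ans'.getD j 0 = if othAll j = true ∧ pvQual P (d + 1) i (pvEnt sr j) = true then mfd j + 1 else -1) := by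
  have hlen_s : s.length = sr.length := hperm.length_eq.trans (pvStor_length sr)
  have hluv : u.length + v.length = sr.length := by
    rw [← hlen_s, hsplit]; simp
  set t := P.getD d 0 with ht
  set cond : List Int → Bool := fun x => decide (pvGet x i ≤ t) with hcond
  set seg := v.takeWhile cond with hseg
  set rest := v.dropWhile cond with hrest
  have hvsplit : v = seg ++ rest := (List.takeWhile_append_dropWhile).symm
  have hq1 : ∀ x, pvQual P (d + 1) i x = (pvQual P d i x || cond x) := fun x =>
    pvQual_succ P d i x hd
  -- the three blocks against the day-(d+1) predicate
  have hu' : ∀ x ∈ u ++ seg, pvQual P (d + 1) i x = true := by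
    intro x hx
    rcases List.mem_append.1 hx with hx | hx
    · exact pvQual_le P d (d + 1) i x (by omega) (hu x hx)
    · rw [hq1, List.mem_takeWhile_imp hx, Bool.or_true]
  have hrest' : ∀ x ∈ rest, pvQual P (d + 1) i x = false := by
    intro x hx
    have hxv : x ∈ v := (List.dropWhile_sublist cond).mem hx
    have hvp : v.Pairwise (fun a b => pvGet a i ≤ pvGet b i) :=
      (List.pairwise_append.1 (hsplit ▸ hpair)).2.1
    have hcx : cond x = false := pvDropWhile_all_not v i t hvp x hx
    rw [hq1, hv x hxv, hcx]; rfl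
  -- entries are augmented story rows
  have hmem_s : ∀ x ∈ s, ∃ (j : Nat) (hj : j < sr.length), x = sr[j] ++ [(j : Int)] := by
    intro x hx
    exact (pvStor_mem_iff sr x).1 (hperm.mem_iff.1 hx)
  have hseg_s : ∀ x ∈ seg, x ∈ s := by
    intro x hx
    rw [hsplit, hvsplit]
    exact List.mem_append.2 (Or.inr (List.mem_append.2 (Or.inl hx)))
  have hj_seg : ∀ x ∈ seg, ∃ jn : Nat, pvGet x (-1) = (jn : Int) ∧ jn < trig.length := by
    intro x hx
    obtain ⟨j, hj, rfl⟩ := hmem_s x (hseg_s x hx)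
    exact ⟨j, by rw [pvGet, PySem.List.pyGetD_neg_one_append_singleton], by omega⟩
  have hnd : (seg.map (fun x => pvGet x (-1))).Nodup := by
    have h1 : (s.map (fun x => pvGet x (-1))).Nodup :=
      ((hperm.map _).nodup_iff).2 (pvStor_last_nodup sr)
    have h2 : seg.Sublist s := by
      rw [hsplit]
      exact ((List.takeWhile_sublist cond).trans (List.sublist_append_right u v))
    exact (h2.map _).nodup h1
  have hfold := pvEvent_foldl (d : Int) seg trig ans (by omega) hj_seg hnd
  obtain ⟨hfl1, hfl2, hfv⟩ := hfold
  -- membership in the consumed block ↔ the entry becomes qualified today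
  have hinseg : ∀ (j : Nat), j < sr.length →
      ((∃ x ∈ seg, pvGet x (-1) = (j : Int)) ↔
        (pvQual P (d + 1) i (pvEnt sr j) = true ∧ pvQual P d i (pvEnt sr j) = false)) := by
    intro j hj
    constructor
    · rintro ⟨x, hx, hxl⟩
      obtain ⟨j', hj', hx'⟩ := hmem_s x (hseg_s x hx)
      have : (j' : Int) = (j : Int) := by
        rw [← hxl, hx', pvGet, PySem.List.pyGetD_neg_one_append_singleton]
      have hjj : j' = j := by exact_mod_cast this
      subst hjj
      have hxe : x = pvEnt sr j' := by rw [hx', pvEnt_eq _ _ hj']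
      subst hxe
      exact ⟨hu' _ (List.mem_append.2 (Or.inr hx)), hv _ ((List.takeWhile_sublist cond).mem hx)⟩
    · rintro ⟨h1, h2⟩
      have hmem : pvEnt sr j ∈ s := by
        rw [hperm.mem_iff, pvEnt_eq _ _ hj]
        exact (pvStor_mem_iff sr _).2 ⟨j, hj, rfl⟩
      rw [hsplit, hvsplit, List.mem_append] at hmem
      rcases hmem with hmem | hmem
      · exact absurd (hu _ hmem) (by simp [h2])
      · rcases List.mem_append.1 hmem with hmem | hmem
        · exact ⟨pvEnt sr j, hmem, pvEnt_last sr j hj⟩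
        · exact absurd (hrest' _ hmem) (by simp [h1])
  -- run the while loop
  have hwhile := pvWhile_spec s i (d : Int) t v u trig ans (sr.length + 1)
    hsplit (by omega)
  rw [hlen_s] at hwhile
  refine ⟨u ++ seg, rest, (seg.foldl (pvEvent (d : Int)) (trig, ans)).1,
    (seg.foldl (pvEvent (d : Int)) (trig, ans)).2, ?_, ?_, hu', hrest', by omega, by omega, ?_, ?_⟩
  · rw [hwhile]
    simp only [List.length_append]
    rfl
  · rw [hsplit, hvsplit, List.append_assoc]
  · intro j hj
    have := hfv j (by omega)
    by_cases hex : ∃ x ∈ seg, pvGet x (-1) = (j : Int)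
    · rw [if_pos hex] at this
      obtain ⟨hq1', hq2'⟩ := (hinseg j hj).1 hex
      rw [this.1, htrig j hj, hq1', hq2']
      simp
    · rw [if_neg hex] at this
      have hqeq : pvQual P (d + 1) i (pvEnt sr j) = pvQual P d i (pvEnt sr j) := by
        by_cases hqd : pvQual P d i (pvEnt sr j) = true
        · rw [hqd, hq1, hqd]; rfl
        · have hnq : ¬ pvQual P (d + 1) i (pvEnt sr j) = true := by
            intro hq
            exact hex ((hinseg j hj).2 ⟨hq, by simpa using hqd⟩)
          simp only [Bool.not_eq_true] at hnq hqd
          rw [hnq, hqd]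
      rw [this.1, htrig j hj, hqeq]
  · intro j hj
    have := hfv j (by omega)
    by_cases hex : ∃ x ∈ seg, pvGet x (-1) = (j : Int)
    · rw [if_pos hex] at this
      obtain ⟨hq1', hq2'⟩ := (hinseg j hj).1 hex
      rw [this.2, htrig j hj, hq2']
      simp only [Bool.false_eq_true, if_false]
      by_cases hall : othAll j = true
      · have h2 : oth j = 2 := ((hoth j hj).2).2 hall
        rw [if_pos (by omega : oth j + 0 + 1 = 3), if_pos ⟨hall, hq1'⟩,
          hmfd j hj hq1' hq2' hall]
      · have h2 : oth j ≠ 2 := fun hh => hall (((hoth j hj).2).1 hh)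
        have hb := (hoth j hj).1
        rw [if_neg (by omega : ¬ oth j + 0 + 1 = 3), hans j hj,
          if_neg (by rintro ⟨ha, -⟩; exact hall ha), if_neg (by rintro ⟨ha, -⟩; exact hall ha)]
    · rw [if_neg hex] at this
      have hqeq : pvQual P (d + 1) i (pvEnt sr j) = pvQual P d i (pvEnt sr j) := by
        by_cases hqd : pvQual P d i (pvEnt sr j) = true
        · rw [hqd, hq1, hqd]; rfl
        · have hnq : ¬ pvQual P (d + 1) i (pvEnt sr j) = true := by
            intro hq
            exact hex ((hinseg j hj).2 ⟨hq, by simpa using hqd⟩)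
          simp only [Bool.not_eq_true] at hnq hqd
          rw [hnq, hqd]
      rw [this.2, hans j hj, hqeq]


-- ---- the day-loop invariant ----

def pvDimInv (di sr : List (List Int)) (i : Int) (d : Nat) (c : Int) : Prop :=
  ∃ u v, PySem.List.sorted (pvStor sr) (fun x => pvGet x i) false = u ++ v ∧
    c = ((u.length : Nat) : Int) ∧ (∀ x ∈ u, pvQual (pvP di i) d i x = true) ∧
    (∀ x ∈ v, pvQual (pvP di i) d i x = false)

def pvInv (di sr : List (List Int)) (d : Nat)
    (st : List Int × List Int × List Int × List Int) : Prop :=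
  st.1 = [((pvCol di 0).take d).sum, ((pvCol di 1).take d).sum, ((pvCol di 2).take d).sum] ∧
  (∃ c0 c1 c2, st.2.1 = [c0, c1, c2] ∧
    pvDimInv di sr 0 d c0 ∧ pvDimInv di sr 1 d c1 ∧ pvDimInv di sr 2 d c2) ∧
  st.2.2.1.length = sr.length ∧ st.2.2.2.length = sr.length ∧
  (∀ j, j < sr.length → st.2.2.1.getD j 0 =
      (if pvQual (pvP di 0) d 0 (pvEnt sr j) = true then 1 else 0) +
      (if pvQual (pvP di 1) d 1 (pvEnt sr j) = true then 1 else 0) +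
      (if pvQual (pvP di 2) d 2 (pvEnt sr j) = true then 1 else 0)) ∧
  (∀ j, j < sr.length → st.2.2.2.getD j 0 =
      if pvQual (pvP di 0) d 0 (pvEnt sr j) = true ∧ pvQual (pvP di 1) d 1 (pvEnt sr j) = true ∧
         pvQual (pvP di 2) d 2 (pvEnt sr j) = true
      then pvMfd di (pvEnt sr j) + 1 else -1)

lemma pvCol_length (di : List (List Int)) (i : Int) : (pvCol di i).length = di.length := by
  simp [pvCol]

lemma pvP_length (di : List (List Int)) (i : Int) : (pvP di i).length = di.length := by
  rw [pvP, pvPrefl_length, pvCol_length]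

lemma pvP_getD (di : List (List Int)) (i : Int) (d : Nat) (hd : d < di.length) :
    (pvP di i).getD d 0 = ((pvCol di i).take d).sum + pvGet (di[d]'hd) i := by
  rw [pvP, pvPrefl_getD _ _ _ (by rw [pvCol_length]; exact hd), zero_add,
    List.sum_take_succ _ _ (by rw [pvCol_length]; exact hd)]
  congr 1
  simp [pvCol]

-- first-hit days: the three components of pvMfd
lemma pvFdI_eq (P : List Int) (i : Int) (x : List Int) (k : Nat)
    (h : P.findIdx? (fun v => decide (pvGet x i ≤ v)) = some k) : pvFdI P i x = (k : Int) := by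
  rw [pvFdI, h]; rfl

lemma pvMfd_eq_of_day (di : List (List Int)) (x : List Int) (d : Nat)
    (h0 : ∃ k, (pvP di 0).findIdx? (fun v => decide (pvGet x 0 ≤ v)) = some k ∧ k ≤ d)
    (h1 : ∃ k, (pvP di 1).findIdx? (fun v => decide (pvGet x 1 ≤ v)) = some k ∧ k ≤ d)
    (h2 : ∃ k, (pvP di 2).findIdx? (fun v => decide (pvGet x 2 ≤ v)) = some k ∧ k ≤ d)
    (hhit : pvFdI (pvP di 0) 0 x = (d : Int) ∨ pvFdI (pvP di 1) 1 x = (d : Int) ∨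
      pvFdI (pvP di 2) 2 x = (d : Int)) :
    pvMfd di x = (d : Int) := by
  obtain ⟨k0, e0, l0⟩ := h0
  obtain ⟨k1, e1, l1⟩ := h1
  obtain ⟨k2, e2, l2⟩ := h2
  rw [pvMfd, pvFdI_eq _ _ _ _ e0, pvFdI_eq _ _ _ _ e1, pvFdI_eq _ _ _ _ e2]
  rw [pvFdI_eq _ _ _ _ e0, pvFdI_eq _ _ _ _ e1, pvFdI_eq _ _ _ _ e2] at hhit
  rcases hhit with h | h | h <;> omega

-- literal-list index/set reductions used to push a day through pvDayStep
lemma pvGet3_0 (a b c : Int) : pvGet [a, b, c] 0 = a := rfl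
lemma pvGet3_1 (a b c : Int) : pvGet [a, b, c] 1 = b := rfl
lemma pvGet3_2 (a b c : Int) : pvGet [a, b, c] 2 = c := rfl
lemma pvSet3_0 (a b c v : Int) : PySem.List.pySetD [a, b, c] 0 v = [v, b, c] := rfl
lemma pvSet3_1 (a b c v : Int) : PySem.List.pySetD [a, b, c] 1 v = [a, v, c] := rfl
lemma pvSet3_2 (a b c v : Int) : PySem.List.pySetD [a, b, c] 2 v = [a, b, v] := rfl
lemma pvNS_0 (x y z : List (List Int)) : PySem.List.pyGetD [x, y, z] 0 [] = x := rfl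
lemma pvNS_1 (x y z : List (List Int)) : PySem.List.pyGetD [x, y, z] 1 [] = y := rfl
lemma pvNS_2 (x y z : List (List Int)) : PySem.List.pyGetD [x, y, z] 2 [] = z := rfl
lemma pvRange3 : PySem.List.pyRange 0 3 1 = [0, 1, 2] := rfl

lemma pvSum_take_succ (di : List (List Int)) (k : Int) (d : Nat) (hd : d < di.length) :
    ((pvCol di k).take (d + 1)).sum = ((pvCol di k).take d).sum + pvGet (di[d]'hd) k := by
  rw [List.sum_take_succ _ _ (by rw [pvCol_length]; exact hd)]
  congr 1
  simp [pvCol]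

-- pushing one day through pvDayStep preserves the invariant
lemma pvDayStep_inv (di sr : List (List Int))
    (d : Nat) (hd : d < di.length)
    (st : List Int × List Int × List Int × List Int)
    (hinv : pvInv di sr d st) :
    pvInv di sr (d + 1)
      (pvDayStep [PySem.List.sorted (pvStor sr) (fun x => pvGet x 0) false,
                  PySem.List.sorted (pvStor sr) (fun x => pvGet x 1) false,
                  PySem.List.sorted (pvStor sr) (fun x => pvGet x 2) false]
        ((sr.length : Nat) : Int) st ((d : Int), di[d]'hd)) := by
  obtain ⟨tmp, idx, trig, ans⟩ := st
  obtain ⟨htmp, ⟨c0, c1, c2, hidx, hD0, hD1, hD2⟩, htl, hal, htrig, hans⟩ := hinv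
  dsimp only at htmp hidx htl hal htrig hans
  subst htmp hidx
  obtain ⟨u0, v0, hsplit0, hc0, hu0, hv0⟩ := hD0
  obtain ⟨u1, v1, hsplit1, hc1, hu1, hv1⟩ := hD1
  obtain ⟨u2, v2, hsplit2, hc2, hu2, hv2⟩ := hD2
  subst hc0 hc1 hc2
  have hP0 : d < (pvP di 0).length := by rw [pvP_length]; exact hd
  have hP1 : d < (pvP di 1).length := by rw [pvP_length]; exact hd
  have hP2 : d < (pvP di 2).length := by rw [pvP_length]; exact hd
  have ht0 : ((pvCol di 0).take d).sum + pvGet (di[d]'hd) 0 = (pvP di 0).getD d 0 :=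
    (pvP_getD di 0 d hd).symm
  have ht1 : ((pvCol di 1).take d).sum + pvGet (di[d]'hd) 1 = (pvP di 1).getD d 0 :=
    (pvP_getD di 1 d hd).symm
  have ht2 : ((pvCol di 2).take d).sum + pvGet (di[d]'hd) 2 = (pvP di 2).getD d 0 :=
    (pvP_getD di 2 d hd).symm
  have hfuel : ((sr.length : Nat) : Int).toNat + 1 = sr.length + 1 := by simp
  -- run dimension 0
  have step0 := pvDim_step sr (pvP di 0) 0 d hP0 _ u0 v0 trig ans
    (PySem.List.sorted_perm ..) (PySem.List.sorted_pairwise ..) hsplit0 hu0 hv0 htl hal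
    (fun j => (if pvQual (pvP di 1) d 1 (pvEnt sr j) = true then 1 else 0) +
              (if pvQual (pvP di 2) d 2 (pvEnt sr j) = true then 1 else 0))
    (fun j => pvQual (pvP di 1) d 1 (pvEnt sr j) && pvQual (pvP di 2) d 2 (pvEnt sr j))
    (fun j => pvMfd di (pvEnt sr j))
    (by intro j hj
        dsimp only
        refine ⟨by constructor <;> split_ifs <;> omega, ?_⟩
        rw [Bool.and_eq_true]
        constructor
        · intro h
          constructor <;> by_contra hc <;> simp only [Bool.not_eq_true] at hc <;>
            rw [hc] at h <;> simp only [Bool.false_eq_true, if_false] at h <;>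
            split_ifs at h <;> omega
        · rintro ⟨h1, h2⟩; rw [h1, h2]; simp)
    (by intro j hj hq1 hq0 hall
        dsimp only at hall
        rw [Bool.and_eq_true] at hall
        rw [pvQual_succ _ _ _ _ hP0, hq0, Bool.false_or, decide_eq_true_iff] at hq1
        have hfi : (pvP di 0).findIdx? (fun v => decide (pvGet (pvEnt sr j) 0 ≤ v)) = some d :=
          pvQual_first_hit _ _ _ _ hP0 hq0 hq1
        obtain ⟨k1, e1, l1⟩ := pvQual_fd_lt _ _ _ _ hall.1
        obtain ⟨k2, e2, l2⟩ := pvQual_fd_lt _ _ _ _ hall.2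
        exact pvMfd_eq_of_day di _ d ⟨d, hfi, le_refl d⟩ ⟨k1, e1, by omega⟩ ⟨k2, e2, by omega⟩
          (Or.inl (pvFdI_eq _ _ _ _ hfi)))
    (by intro j hj; dsimp only; rw [htrig j hj]; ring)
    (by intro j hj; dsimp only; rw [hans j hj]
        refine if_congr ?_ rfl rfl
        rw [Bool.and_eq_true]; tauto)
  obtain ⟨u0', v0', trig1, ans1, heq0, hsplit0', hu0', hv0', htl1, hal1, htrig1, hans1⟩ := step0
  -- run dimension 1
  have step1 := pvDim_step sr (pvP di 1) 1 d hP1 _ u1 v1 trig1 ans1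
    (PySem.List.sorted_perm ..) (PySem.List.sorted_pairwise ..) hsplit1 hu1 hv1 htl1 hal1
    (fun j => (if pvQual (pvP di 0) (d + 1) 0 (pvEnt sr j) = true then 1 else 0) +
              (if pvQual (pvP di 2) d 2 (pvEnt sr j) = true then 1 else 0))
    (fun j => pvQual (pvP di 0) (d + 1) 0 (pvEnt sr j) && pvQual (pvP di 2) d 2 (pvEnt sr j))
    (fun j => pvMfd di (pvEnt sr j))
    (by intro j hj
        dsimp only
        refine ⟨by constructor <;> split_ifs <;> omega, ?_⟩
        rw [Bool.and_eq_true]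
        constructor
        · intro h
          constructor <;> by_contra hc <;> simp only [Bool.not_eq_true] at hc <;>
            rw [hc] at h <;> simp only [Bool.false_eq_true, if_false] at h <;>
            split_ifs at h <;> omega
        · rintro ⟨h1, h2⟩; rw [h1, h2]; simp)
    (by intro j hj hq1 hq0 hall
        dsimp only at hall
        rw [Bool.and_eq_true] at hall
        rw [pvQual_succ _ _ _ _ hP1, hq0, Bool.false_or, decide_eq_true_iff] at hq1
        have hfi : (pvP di 1).findIdx? (fun v => decide (pvGet (pvEnt sr j) 1 ≤ v)) = some d :=
          pvQual_first_hit _ _ _ _ hP1 hq0 hq1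
        obtain ⟨k0, e0, l0⟩ := pvQual_fd_lt _ _ _ _ hall.1
        obtain ⟨k2, e2, l2⟩ := pvQual_fd_lt _ _ _ _ hall.2
        exact pvMfd_eq_of_day di _ d ⟨k0, e0, by omega⟩ ⟨d, hfi, le_refl d⟩ ⟨k2, e2, by omega⟩
          (Or.inr (Or.inl (pvFdI_eq _ _ _ _ hfi))))
    (by intro j hj; dsimp only; rw [htrig1 j hj]; ring)
    (by intro j hj; dsimp only; rw [hans1 j hj]
        refine if_congr ?_ rfl rfl
        rw [Bool.and_eq_true, Bool.and_eq_true]; tauto)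
  obtain ⟨u1', v1', trig2, ans2, heq1, hsplit1', hu1', hv1', htl2, hal2, htrig2, hans2⟩ := step1
  -- run dimension 2
  have step2 := pvDim_step sr (pvP di 2) 2 d hP2 _ u2 v2 trig2 ans2
    (PySem.List.sorted_perm ..) (PySem.List.sorted_pairwise ..) hsplit2 hu2 hv2 htl2 hal2
    (fun j => (if pvQual (pvP di 0) (d + 1) 0 (pvEnt sr j) = true then 1 else 0) +
              (if pvQual (pvP di 1) (d + 1) 1 (pvEnt sr j) = true then 1 else 0))
    (fun j => pvQual (pvP di 0) (d + 1) 0 (pvEnt sr j) && pvQual (pvP di 1) (d + 1) 1 (pvEnt sr j))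
    (fun j => pvMfd di (pvEnt sr j))
    (by intro j hj
        dsimp only
        refine ⟨by constructor <;> split_ifs <;> omega, ?_⟩
        rw [Bool.and_eq_true]
        constructor
        · intro h
          constructor <;> by_contra hc <;> simp only [Bool.not_eq_true] at hc <;>
            rw [hc] at h <;> simp only [Bool.false_eq_true, if_false] at h <;>
            split_ifs at h <;> omega
        · rintro ⟨h1, h2⟩; rw [h1, h2]; simp)
    (by intro j hj hq1 hq0 hall
        dsimp only at hall
        rw [Bool.and_eq_true] at hall
        rw [pvQual_succ _ _ _ _ hP2, hq0, Bool.false_or, decide_eq_true_iff] at hq1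
        have hfi : (pvP di 2).findIdx? (fun v => decide (pvGet (pvEnt sr j) 2 ≤ v)) = some d :=
          pvQual_first_hit _ _ _ _ hP2 hq0 hq1
        obtain ⟨k0, e0, l0⟩ := pvQual_fd_lt _ _ _ _ hall.1
        obtain ⟨k1, e1, l1⟩ := pvQual_fd_lt _ _ _ _ hall.2
        exact pvMfd_eq_of_day di _ d ⟨k0, e0, by omega⟩ ⟨k1, e1, by omega⟩ ⟨d, hfi, le_refl d⟩
          (Or.inr (Or.inr (pvFdI_eq _ _ _ _ hfi))))
    (by intro j hj; dsimp only; rw [htrig2 j hj]; ring)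
    (by intro j hj; dsimp only; rw [hans2 j hj]
        refine if_congr ?_ rfl rfl
        rw [Bool.and_eq_true, Bool.and_eq_true]; tauto)
  obtain ⟨u2', v2', trig3, ans3, heq2, hsplit2', hu2', hv2', htl3, hal3, htrig3, hans3⟩ := step2
  -- evaluate pvDayStep
  have hexpand : pvDayStep [PySem.List.sorted (pvStor sr) (fun x => pvGet x 0) false,
                  PySem.List.sorted (pvStor sr) (fun x => pvGet x 1) false,
                  PySem.List.sorted (pvStor sr) (fun x => pvGet x 2) false]
        ((sr.length : Nat) : Int)
        ([((pvCol di 0).take d).sum, ((pvCol di 1).take d).sum, ((pvCol di 2).take d).sum],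
         [((u0.length : Nat) : Int), ((u1.length : Nat) : Int), ((u2.length : Nat) : Int)],
         trig, ans)
        ((d : Int), di[d]'hd)
      = ([(pvP di 0).getD d 0, (pvP di 1).getD d 0, (pvP di 2).getD d 0],
         [((u0'.length : Nat) : Int), ((u1'.length : Nat) : Int), ((u2'.length : Nat) : Int)],
         trig3, ans3) := by
    simp only [pvDayStep, pvRange3, List.foldl_cons, List.foldl_nil,
      pvGet3_0, pvGet3_1, pvGet3_2, pvSet3_0, pvSet3_1, pvSet3_2, pvNS_0, pvNS_1, pvNS_2,
      ht0, ht1, ht2, hfuel, heq0, heq1, heq2]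
  rw [hexpand]
  refine ⟨?_, ⟨_, _, _, rfl, ⟨u0', v0', hsplit0', rfl, hu0', hv0'⟩,
    ⟨u1', v1', hsplit1', rfl, hu1', hv1'⟩, ⟨u2', v2', hsplit2', rfl, hu2', hv2'⟩⟩,
    htl3, hal3, ?_, ?_⟩
  · dsimp only
    rw [pvSum_take_succ di 0 d hd, pvSum_take_succ di 1 d hd, pvSum_take_succ di 2 d hd,
      ht0, ht1, ht2]
  · intro j hj
    rw [htrig3 j hj]
  · intro j hj
    rw [hans3 j hj]
    refine if_congr ?_ rfl rfl
    rw [Bool.and_eq_true]; tauto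


-- running the whole day loop from a prefix boundary
lemma pvLoop (di sr : List (List Int)) :
    ∀ (rest done : List (List Int)) (st : List Int × List Int × List Int × List Int),
      di = done ++ rest → pvInv di sr done.length st →
      pvInv di sr di.length
        ((PySem.List.enumerate rest ((done.length : Nat) : Int)).foldl
          (pvDayStep [PySem.List.sorted (pvStor sr) (fun x => pvGet x 0) false,
                      PySem.List.sorted (pvStor sr) (fun x => pvGet x 1) false,
                      PySem.List.sorted (pvStor sr) (fun x => pvGet x 2) false]
            ((sr.length : Nat) : Int)) st) := by
  intro rest
  induction rest with
  | nil =>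
    intro done st hdi hinv
    rw [List.append_nil] at hdi
    subst hdi
    simpa [PySem.List.enumerate] using hinv
  | cons row rest ih =>
    intro done st hdi hinv
    have hd : done.length < di.length := by rw [hdi]; simp
    have hrow : di[done.length]'hd = row := by
      have h' : di[done.length]? = some row := by
        rw [hdi, List.getElem?_append_right (le_refl _)]
        simp
      rw [List.getElem?_eq_getElem hd] at h'
      exact Option.some.inj h'
    rw [PySem.List.enumerate_cons, List.foldl_cons]
    have hstep := pvDayStep_inv di sr done.length hd st hinv
    rw [hrow] at hstep
    have hlen : di = (done ++ [row]) ++ rest := by rw [hdi]; simp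
    have hcast : ((done.length : Nat) : Int) + 1 = (((done ++ [row]).length : Nat) : Int) := by
      simp
    have := ih (done ++ [row])
      (pvDayStep [PySem.List.sorted (pvStor sr) (fun x => pvGet x 0) false,
                  PySem.List.sorted (pvStor sr) (fun x => pvGet x 1) false,
                  PySem.List.sorted (pvStor sr) (fun x => pvGet x 2) false]
        ((sr.length : Nat) : Int) st (((done.length : Nat) : Int), row))
      hlen (by simpa using hstep)
    rw [hcast]
    exact this

-- the state before day 0 satisfies the invariant
lemma pvInit (di sr : List (List Int)) :
    pvInv di sr 0 ([0, 0, 0], [0, 0, 0],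
      (PySem.List.pyRange 0 ((sr.length : Nat) : Int) 1).map (fun _ => (0 : Int)),
      (PySem.List.pyRange 0 ((sr.length : Nat) : Int) 1).map (fun _ => (-1 : Int))) := by
  have hR := PySem.List.pyRange_zero_natCast sr.length
  have hlen : ∀ c : Int, ((PySem.List.pyRange 0 ((sr.length : Nat) : Int) 1).map
      (fun _ => c)).length = sr.length := by intro c; rw [hR]; simp
  have hget : ∀ (c : Int) (j : Nat), j < sr.length →
      ((PySem.List.pyRange 0 ((sr.length : Nat) : Int) 1).map (fun _ => c)).getD j 0 = c := by
    intro c j hj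
    rw [List.getD_eq_getElem _ _ (by rw [hlen]; exact hj)]
    simp
  refine ⟨by simp, ⟨0, 0, 0, rfl, ?_, ?_, ?_⟩, hlen 0, hlen (-1), ?_, ?_⟩
  · exact ⟨[], _, rfl, rfl, by simp, fun x _ => pvQual_zero _ _ _⟩
  · exact ⟨[], _, rfl, rfl, by simp, fun x _ => pvQual_zero _ _ _⟩
  · exact ⟨[], _, rfl, rfl, by simp, fun x _ => pvQual_zero _ _ _⟩
  · intro j hj
    rw [hget 0 j hj]
    simp [pvQual_zero]
  · intro j hj
    rw [hget (-1) j hj]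
    simp [pvQual_zero]

-- the three attribute reads ignore the appended story index
lemma pvQual_append_id (P : List Int) (d : Nat) (r : List Int) (hr : r.length = 3) (e : Int) :
    pvQual P d 0 (r ++ [e]) = pvQual P d 0 r ∧ pvQual P d 1 (r ++ [e]) = pvQual P d 1 r ∧
    pvQual P d 2 (r ++ [e]) = pvQual P d 2 r := by
  obtain ⟨h0, h1, h2, -⟩ := pvGet_row3 r hr e
  exact ⟨by simp only [pvQual, h0], by simp only [pvQual, h1], by simp only [pvQual, h2]⟩

lemma pvMfd_append_id (di : List (List Int)) (r : List Int) (hr : r.length = 3) (e : Int) :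
    pvMfd di (r ++ [e]) = pvMfd di r := by
  obtain ⟨h0, h1, h2, -⟩ := pvGet_row3 r hr e
  simp only [pvMfd, pvFdI, h0, h1, h2]

-- B's per-story answer
def pvG (di : List (List Int)) (row : List Int) : Int :=
  if pvGet row 0 = 0 ∧ pvGet row 1 = 0 ∧ pvGet row 2 = 0 then 0
  else
    match pvBest [(pvP di 0, pvGet row 0), (pvP di 1, pvGet row 1), (pvP di 2, pvGet row 2)] (-1) with
    | none => -1
    | some best => best + 1

lemma pvIfMax (a b : Int) : (if a < b then b else a) = a ⊔ b := by
  rw [Int.max_def]; split_ifs <;> omega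

-- A's stored answer coincides with B's per-story computation
lemma pvVal_eq (di : List (List Int)) (x : List Int) :
    (if pvQual (pvP di 0) di.length 0 x = true ∧ pvQual (pvP di 1) di.length 1 x = true ∧
        pvQual (pvP di 2) di.length 2 x = true then pvMfd di x + 1 else -1)
    = match pvBest [(pvP di 0, pvGet x 0), (pvP di 1, pvGet x 1), (pvP di 2, pvGet x 2)] (-1) with
      | none => -1
      | some best => best + 1 := by
  have q0 := pvQual_full (pvP di 0) 0 x
  have q1 := pvQual_full (pvP di 1) 1 x
  have q2 := pvQual_full (pvP di 2) 2 x
  rw [pvP_length] at q0 q1 q2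
  cases h0 : (pvP di 0).findIdx? (fun v => decide (pvGet x 0 ≤ v)) with
  | none =>
    rw [if_neg (by rw [q0, h0]; simp)]
    simp [pvBest, pvFirst, h0]
  | some k0 =>
    cases h1 : (pvP di 1).findIdx? (fun v => decide (pvGet x 1 ≤ v)) with
    | none =>
      rw [if_neg (by rw [q1, h1]; simp)]
      simp [pvBest, pvFirst, h0, h1]
    | some k1 =>
      cases h2 : (pvP di 2).findIdx? (fun v => decide (pvGet x 2 ≤ v)) with
      | none =>
        rw [if_neg (by rw [q2, h2]; simp)]
        simp [pvBest, pvFirst, h0, h1, h2]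
      | some k2 =>
        rw [if_pos ⟨by rw [q0, h0]; rfl, by rw [q1, h1]; rfl, by rw [q2, h2]; rfl⟩]
        rw [pvMfd, pvFdI_eq _ _ _ _ h0, pvFdI_eq _ _ _ _ h1, pvFdI_eq _ _ _ _ h2]
        simp only [pvBest, pvFirst, h0, h1, h2]
        rw [if_pos (by omega : (-1 : Int) < (k0 : Int)), pvIfMax, pvIfMax]

-- B's prefix fold builds exactly the three prefix-sum lists
lemma pvPref_fold (di : List (List Int)) :
    ∀ (pa pb pc : List Int) (ta tb tc : Int),
      di.foldl (fun (st : List Int × List Int × List Int × Int × Int × Int) row =>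
        (st.1 ++ [st.2.2.2.1 + pvGet row 0], st.2.1 ++ [st.2.2.2.2.1 + pvGet row 1],
         st.2.2.1 ++ [st.2.2.2.2.2 + pvGet row 2], st.2.2.2.1 + pvGet row 0,
         st.2.2.2.2.1 + pvGet row 1, st.2.2.2.2.2 + pvGet row 2)) (pa, pb, pc, ta, tb, tc)
      = (pa ++ pvPrefl (pvCol di 0) ta, pb ++ pvPrefl (pvCol di 1) tb,
         pc ++ pvPrefl (pvCol di 2) tc, ta + (pvCol di 0).sum, tb + (pvCol di 1).sum,
         tc + (pvCol di 2).sum) := by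
  induction di with
  | nil => intro pa pb pc ta tb tc; simp [pvPrefl, pvCol]
  | cons row di ih =>
    intro pa pb pc ta tb tc
    rw [List.foldl_cons]
    dsimp only
    rw [ih]
    have hc : ∀ k : Int, pvCol (row :: di) k = pvGet row k :: pvCol di k := fun k => rfl
    simp only [hc, pvPrefl, List.sum_cons, List.append_assoc, List.cons_append,
      List.nil_append, add_assoc]

-- B computed per story
lemma pvB_eq (di sr : List (List Int)) : getTriggerTime_alt di sr = sr.map (pvG di) := by
  simp only [getTriggerTime_alt]
  rw [pvPref_fold]
  dsimp only
  simp only [List.nil_append]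
  have hP : ∀ k : Int, pvPrefl (pvCol di k) 0 = pvP di k := fun k => rfl
  simp only [hP]
  have hbody : (fun (res : List Int) (row : List Int) =>
      if pvGet row 0 = 0 ∧ pvGet row 1 = 0 ∧ pvGet row 2 = 0 then res ++ [(0 : Int)]
      else
        match pvBest [(pvP di 0, pvGet row 0), (pvP di 1, pvGet row 1),
            (pvP di 2, pvGet row 2)] (-1) with
        | none => res ++ [(-1 : Int)]
        | some best => res ++ [best + 1])
      = fun res row => res ++ [pvG di row] := by
    funext res row
    rw [pvG]
    split_ifs with h
    · rfl
    · cases hb : pvBest [(pvP di 0, pvGet row 0), (pvP di 1, pvGet row 1),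
          (pvP di 2, pvGet row 2)] (-1) with
      | none => simp
      | some b => simp
  rw [hbody, PySem.List.foldl_append_singleton_eq_map, List.nil_append]

-- A computed per story
lemma pvA_eq (di sr : List (List Int)) (hsr3 : ∀ r ∈ sr, r.length = 3) :
    getTriggerTime di sr = sr.map (pvG di) := by
  have hA : getTriggerTime di sr =
      (PySem.List.enumerate (pvStor sr) 0).foldl
        (fun ans p =>
          if pvGet p.2 0 = 0 ∧ pvGet p.2 1 = 0 ∧ pvGet p.2 2 = 0 then
            PySem.List.pySetD ans (pvGet p.2 3) 0
          else ans)
        (((PySem.List.enumerate di 0).foldl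
          (pvDayStep [PySem.List.sorted (pvStor sr) (fun x => pvGet x 0) false,
                      PySem.List.sorted (pvStor sr) (fun x => pvGet x 1) false,
                      PySem.List.sorted (pvStor sr) (fun x => pvGet x 2) false]
            (((pvStor sr).length : Nat) : Int))
          ([0, 0, 0], [0, 0, 0],
           (PySem.List.pyRange 0 (((pvStor sr).length : Nat) : Int) 1).map (fun _ => (0 : Int)),
           (PySem.List.pyRange 0 (((pvStor sr).length : Nat) : Int) 1).map
             (fun _ => (-1 : Int)))).2.2.2) := rfl
  rw [hA, pvStor_length]
  have hloop := pvLoop di sr di []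
    ([0, 0, 0], [0, 0, 0],
     (PySem.List.pyRange 0 ((sr.length : Nat) : Int) 1).map (fun _ => (0 : Int)),
     (PySem.List.pyRange 0 ((sr.length : Nat) : Int) 1).map (fun _ => (-1 : Int)))
    (by simp) (pvInit di sr)
  simp only [List.length_nil, Nat.cast_zero] at hloop
  obtain ⟨-, -, -, halF, -, hansF⟩ := hloop
  set stF := (PySem.List.enumerate di 0).foldl
    (pvDayStep [PySem.List.sorted (pvStor sr) (fun x => pvGet x 0) false,
                PySem.List.sorted (pvStor sr) (fun x => pvGet x 1) false,
                PySem.List.sorted (pvStor sr) (fun x => pvGet x 2) false]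
      ((sr.length : Nat) : Int))
    ([0, 0, 0], [0, 0, 0],
     (PySem.List.pyRange 0 ((sr.length : Nat) : Int) 1).map (fun _ => (0 : Int)),
     (PySem.List.pyRange 0 ((sr.length : Nat) : Int) 1).map (fun _ => (-1 : Int))) with hstF
  have hz := pvZero_foldl (PySem.List.enumerate (pvStor sr) 0) stF.2.2.2
    (by intro e he
        obtain ⟨k, hk, rfl⟩ := (PySem.List.mem_enumerate_iff _ _ _).1 he
        have hk' : k < sr.length := by simpa [pvStor_length] using hk
        refine ⟨k, ?_, by omega⟩
        dsimp only
        rw [pvStor_getElem _ _ hk']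
        exact (pvGet_row3 _ (hsr3 _ (List.getElem_mem hk')) _).2.2.2)
  obtain ⟨hzl, hzv⟩ := hz
  apply List.ext_getElem
  · rw [hzl, halF]; simp
  · intro j h1 h2
    have hj : j < sr.length := by simpa using h2
    have hrl : (sr[j]'hj).length = 3 := hsr3 _ (List.getElem_mem hj)
    obtain ⟨hg0, hg1, hg2, hg3⟩ := pvGet_row3 (sr[j]'hj) hrl (j : Int)
    have hent : pvEnt sr j = sr[j]'hj ++ [(j : Int)] := pvEnt_eq sr j hj
    have hiff : (∃ e ∈ PySem.List.enumerate (pvStor sr) 0, pvGet e.2 3 = (j : Int) ∧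
        pvGet e.2 0 = 0 ∧ pvGet e.2 1 = 0 ∧ pvGet e.2 2 = 0) ↔
        (pvGet (sr[j]'hj) 0 = 0 ∧ pvGet (sr[j]'hj) 1 = 0 ∧ pvGet (sr[j]'hj) 2 = 0) := by
      constructor
      · rintro ⟨e, he, hid, hz0, hz1, hz2⟩
        obtain ⟨k, hk, rfl⟩ := (PySem.List.mem_enumerate_iff _ _ _).1 he
        have hk' : k < sr.length := by simpa [pvStor_length] using hk
        have hkrl : (sr[k]'hk').length = 3 := hsr3 _ (List.getElem_mem hk')
        obtain ⟨hh0, hh1, hh2, hh3⟩ := pvGet_row3 (sr[k]'hk') hkrl (k : Int)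
        rw [pvStor_getElem _ _ hk'] at hid hz0 hz1 hz2
        rw [hh3] at hid
        have hkj : k = j := by exact_mod_cast hid
        subst hkj
        rw [hh0] at hz0; rw [hh1] at hz1; rw [hh2] at hz2
        exact ⟨hz0, hz1, hz2⟩
      · rintro ⟨hz0, hz1, hz2⟩
        refine ⟨((0 : Int) + (j : Nat), (pvStor sr)[j]'(by rw [pvStor_length]; exact hj)), ?_, ?_⟩
        · rw [PySem.List.mem_enumerate_iff _ _ _]
          exact ⟨j, by rw [pvStor_length]; exact hj, rfl⟩
        · dsimp only
          rw [pvStor_getElem _ _ hj]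
          exact ⟨hg3, by rw [hg0]; exact hz0, by rw [hg1]; exact hz1, by rw [hg2]; exact hz2⟩
    have hmap : (sr.map (pvG di))[j]'h2 = pvG di (sr[j]'hj) := List.getElem_map _
    rw [hmap, ← List.getD_eq_getElem _ 0 h1]
    have hzv' := hzv j (by omega)
    by_cases hzero : pvGet (sr[j]'hj) 0 = 0 ∧ pvGet (sr[j]'hj) 1 = 0 ∧ pvGet (sr[j]'hj) 2 = 0
    · rw [if_pos (hiff.2 hzero)] at hzv'
      rw [hzv', pvG, if_pos hzero]
    · rw [if_neg (fun h => hzero (hiff.1 h))] at hzv'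
      rw [hzv', hansF j hj, pvG, if_neg hzero]
      have hqs := pvQual_append_id (pvP di 0) di.length (sr[j]'hj) hrl (j : Int)
      have hqs1 := pvQual_append_id (pvP di 1) di.length (sr[j]'hj) hrl (j : Int)
      have hqs2 := pvQual_append_id (pvP di 2) di.length (sr[j]'hj) hrl (j : Int)
      rw [hent, hqs.1, hqs1.2.1, hqs2.2.2, pvMfd_append_id di _ hrl]
      exact pvVal_eq di (sr[j]'hj)
-- ===== VERDICT (by name: the statement is the Claim_ definition above) =====
theorem getTriggerTime_spec : Claim_equal_getTriggerTime := by
  intro day_increase story_requires hdom hpre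
  unfold Spec_getTriggerTime
  rw [pvA_eq day_increase story_requires hpre.2, pvB_eq day_increase story_requires]
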